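-- pv_equiv track=rewrite | github.com/Cosmmoss/basic_exercises | for_dict_challenges_bonus.py | user_wrote_most_messages
-- ===== SOURCE A (Python) =====
-- def user_wrote_most_messages(history):
--
--     user_id_message = {}  # создаётся словарь с парой - 'user_id': кол-во сообщений
--     for message in history:
--         user_id_message[message['sent_by']] = user_id_message.get(message['sent_by'], 0) + 1
--
--     user_id_max = max(user_id_message.items(), key=lambda items: items[1])  # определяю максимальное количество сообщений
--
--     ids_with_max_messages = []
--     for user_id, message_count in user_id_message.items():  # для определения всех айди пользователей, которые написали больше всех сообщений
--         if message_count == user_id_max[1]: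
--             ids_with_max_messages.append(user_id)
--
--     return f'ID пользователя(ей), который(е) написал(и) больше всех сообщений: {ids_with_max_messages}'
-- ===== SOURCE B (Python) =====
-- def user_wrote_most_messages(history):
--     counts = {}
--     for message in history:
--         counts[message['sent_by']] = counts.get(message['sent_by'], 0) + 1
--     groups = {}
--     for user_id, cnt in counts.items():
--         groups.setdefault(cnt, []).append(user_id)
--     winners = groups[max(groups)]
--     return f'ID пользователя(ей), который(е) написал(и) больше всех сообщений: {winners}'
-- ===== Notes on version B (the rewrite author's own statement) =====
-- stated objective: alternative
-- what changed: After the same counting pass, B inverts the counts into a count->ids grouping dict and returns the group at the maximal key, replacing A's max-over-items plus second filter scan.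
import Mathlib
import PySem

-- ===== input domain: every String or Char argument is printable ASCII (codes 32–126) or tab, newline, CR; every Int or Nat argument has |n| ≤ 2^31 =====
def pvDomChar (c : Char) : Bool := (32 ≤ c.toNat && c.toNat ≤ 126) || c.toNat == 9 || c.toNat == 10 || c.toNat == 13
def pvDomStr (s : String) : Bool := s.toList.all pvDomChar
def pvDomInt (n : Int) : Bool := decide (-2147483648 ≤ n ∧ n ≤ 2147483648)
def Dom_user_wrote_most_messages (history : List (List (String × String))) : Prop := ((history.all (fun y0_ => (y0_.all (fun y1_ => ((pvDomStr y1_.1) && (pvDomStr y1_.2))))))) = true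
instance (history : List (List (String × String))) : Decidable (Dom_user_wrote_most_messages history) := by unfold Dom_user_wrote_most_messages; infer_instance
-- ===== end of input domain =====

-- B replaces A's "max over items then a second filter scan" by inverting the count dict into a
-- count→ids grouping dict and looking up its largest key (objective: alternative decomposition).
-- Shared formatting helper: Python's repr of a str (quote choice and escapes as CPython prints them)
def pyReprChars (cs : List Char) : List Char :=
  let q : Char := if cs.contains '\'' && !(cs.contains '"') then '"' else '\''
  (q :: cs.flatMap (fun c =>
    if c = '\\' then ['\\', '\\']
    else if c = '\t' then ['\\', 't']
    else if c = '\n' then ['\\', 'n']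
    else if c = '\r' then ['\\', 'r']
    else if c = q then ['\\', q]
    else [c])) ++ [q]

-- the shared f-string 'ID …: {list_of_ids}' (Python list display of the winner ids)
def pyFmt (ids : List String) : String :=
  "ID пользователя(ей), который(е) написал(и) больше всех сообщений: ["
    ++ String.intercalate ", " (ids.map (fun s => String.ofList (pyReprChars s.toList)))
    ++ "]"

-- ===== PORT A =====
def user_wrote_most_messages (history : List (List (String × String))) : String :=
  let counts := history.foldl (fun d message =>
      let k := (PySem.Dict.mk message).getD "sent_by" ""
      d.insert k (d.getD k 0 + 1)) (PySem.Dict.empty : PySem.Dict String Int)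
  match PySem.List.max? counts.items (fun it => it.2) with
  | none => ""   -- Python: max() of the empty dict raises ValueError (excluded by Pre_)
  | some user_id_max =>
      let ids_with_max_messages := counts.items.foldl
        (fun acc p => if p.2 == user_id_max.2 then acc ++ [p.1] else acc) []
      pyFmt ids_with_max_messages

-- ===== PORT B =====
def user_wrote_most_messages_alt (history : List (List (String × String))) : String :=
  let counts := history.foldl (fun d message =>
      let k := (PySem.Dict.mk message).getD "sent_by" ""
      d.insert k (d.getD k 0 + 1)) (PySem.Dict.empty : PySem.Dict String Int)
  let groups := counts.items.foldl
      (fun g p => g.modify p.2 [] (· ++ [p.1])) (PySem.Dict.empty : PySem.Dict Int (List String))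
  match PySem.List.max? groups.keys (fun x => x) with
  | none => ""   -- Python: max() of the empty dict raises ValueError (excluded by Pre_)
  | some m => pyFmt (groups.getD m [])

-- ===== PRECONDITION & SPEC =====
-- Pre_ excludes exactly the inputs on which Python A raises: empty history (ValueError from max)
-- and a message without a 'sent_by' key (KeyError).
def Pre_user_wrote_most_messages (history : List (List (String × String))) : Prop :=
  history ≠ [] ∧ history.all (fun msg => msg.any (fun p => p.1 == "sent_by")) = true
instance (history : List (List (String × String))) : Decidable (Pre_user_wrote_most_messages history) := by unfold Pre_user_wrote_most_messages; infer_instance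
def pvWitness_user_wrote_most_messages : (List (List (String × String))) := [[("sent_by", "alice")], [("sent_by", "bob")], [("sent_by", "alice")]]

def Spec_user_wrote_most_messages (history : List (List (String × String))) (out : String) : Prop := out = user_wrote_most_messages_alt history
instance (history : List (List (String × String))) (out : String) : Decidable (Spec_user_wrote_most_messages history out) := by unfold Spec_user_wrote_most_messages; infer_instance

-- ===== CLAIM (what is proved, stated in full; the proofs are below) =====
def Claim_equal_user_wrote_most_messages : Prop := ∀ (history : List (List (String × String))), Dom_user_wrote_most_messages history → Pre_user_wrote_most_messages history → Spec_user_wrote_most_messages history (user_wrote_most_messages history)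

-- ===== LEMMAS AND PROOFS =====

-- B's grouping dict looked up at c is exactly "the ids whose count is c", in items order
theorem groups_getD (l : List (String × Int)) (m : Int) :
    ((l.foldl (fun g p => g.modify p.2 [] (· ++ [p.1])) (PySem.Dict.empty : PySem.Dict Int (List String))).getD m [])
      = (l.filter (fun q => q.2 == m)).map (·.1) := by
  have h := List.foldl_map (f := fun p : String × Int => (p.2, p.1))
        (g := fun (g : PySem.Dict Int (List String)) q => PySem.Dict.modify g q.1 [] (· ++ [q.2]))
        (l := l) (init := PySem.Dict.empty)
  rw [← h, PySem.Dict.getD_foldl_modify_append]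
  simp [List.filter_map, Function.comp_def]

-- B's grouping dict has exactly the distinct count values as keys
theorem groups_keys (l : List (String × Int)) :
    (l.foldl (fun g p => g.modify p.2 [] (· ++ [p.1])) (PySem.Dict.empty : PySem.Dict Int (List String))).keys
      = PySem.Set.ofList (l.map (·.2)) := by
  rw [PySem.Dict.keys_foldl_modify_key]
  simp [PySem.Dict.keys, PySem.Dict.empty, PySem.Set.update_nil_left]

-- the two selection strategies agree on any nonempty items list
theorem select_agree (items : List (String × Int)) (hne : items ≠ []) :
    (match PySem.List.max? items (fun it => it.2) with
     | none => ""
     | some user_id_max =>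
         pyFmt (items.foldl (fun acc p => if p.2 == user_id_max.2 then acc ++ [p.1] else acc) []))
  = (let groups := items.foldl (fun g p => g.modify p.2 [] (· ++ [p.1]))
        (PySem.Dict.empty : PySem.Dict Int (List String));
     match PySem.List.max? groups.keys (fun x => x) with
     | none => ""
     | some m => pyFmt (groups.getD m [])) := by
  obtain ⟨p, hp⟩ : ∃ p, PySem.List.max? items (fun it => it.2) = some p := by
    cases h : PySem.List.max? items (fun it => it.2) with
    | none => exact absurd ((PySem.List.max?_eq_none_iff _ _).mp h) hne
    | some p => exact ⟨p, rfl⟩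
  simp only [groups_keys]
  obtain ⟨m, hm⟩ : ∃ m, PySem.List.max? (PySem.Set.ofList (items.map (·.2))) (fun x => x) = some m := by
    cases h : PySem.List.max? (PySem.Set.ofList (items.map (·.2))) (fun x => x) with
    | none =>
        have := (PySem.List.max?_eq_none_iff _ _).mp h
        have hmem : p.2 ∈ PySem.Set.ofList (items.map (·.2)) := by
          rw [PySem.Set.mem_ofList]
          exact List.mem_map_of_mem (PySem.List.max?_mem hp)
        simp [this] at hmem
    | some m => exact ⟨m, rfl⟩
  have hpm : p.2 = m := by
    have h1 : m ≤ p.2 := by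
      have hmmem : m ∈ items.map (·.2) :=
        (PySem.Set.mem_ofList _ _).mp (PySem.List.max?_mem hm)
      obtain ⟨q, hq, hq2⟩ := List.mem_map.mp hmmem
      have := PySem.List.max?_isMax hp q hq
      omega
    have h2 : p.2 ≤ m := by
      have hpmem : p.2 ∈ PySem.Set.ofList (items.map (·.2)) := by
        rw [PySem.Set.mem_ofList]
        exact List.mem_map_of_mem (PySem.List.max?_mem hp)
      exact PySem.List.max?_isMax hm p.2 hpmem
    omega
  simp only [hp, hm, groups_getD, PySem.List.foldl_append_if, List.nil_append, hpm]

-- the shared counting loop is Counter over the per-message sender keys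
theorem counts_eq (history : List (List (String × String))) :
    history.foldl (fun d message =>
        let k := (PySem.Dict.mk message).getD "sent_by" ""
        d.insert k (d.getD k 0 + 1)) (PySem.Dict.empty : PySem.Dict String Int)
      = PySem.Dict.counter (history.map (fun message => (PySem.Dict.mk message).getD "sent_by" "")) := by
  rw [← PySem.Dict.foldl_insert_getD_add_one_eq_counter, List.foldl_map]

-- ===== VERDICT (by name: the statement is the Claim_ definition above) =====
theorem user_wrote_most_messages_spec : Claim_equal_user_wrote_most_messages := by
  intro history _hdom hpre
  unfold Spec_user_wrote_most_messages user_wrote_most_messages user_wrote_most_messages_alt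
  simp only [counts_eq]
  apply select_agree
  intro hitems
  have hkeys : history.map (fun message => (PySem.Dict.mk message).getD "sent_by" "") ≠ [] := by
    simp [hpre.1]
  obtain ⟨k, ks, hk⟩ := List.exists_cons_of_ne_nil hkeys
  rw [hk] at hitems
  rw [PySem.Dict.items_counter, PySem.Set.ofList_cons] at hitems
  simp at hitems
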